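-- pv_equiv track=rewrite | github.com/LaLaLaU/ZiZhi | zizhi/case_retrieval.py | _merge_mapping_reasons
-- ===== SOURCE A (Python) =====
-- def _merge_mapping_reasons(reasons: list[str]) -> str:
--     cleaned = [reason.split(":", 1)[1] for reason in reasons if ":" in reason]
--     if not cleaned:
--         return ""
--     unique = []
--     seen: set[str] = set()
--     for reason in cleaned:
--         if reason in seen:
--             continue
--         seen.add(reason)
--         unique.append(reason)
--     return unique[0]
-- ===== SOURCE B (Python) =====
-- def _merge_mapping_reasons(reasons: list[str]) -> str:
--     for reason in reasons:
--         if ":" in reason: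
--             return reason.split(":", 1)[1]
--     return ""
-- ===== Notes on version B (the rewrite author's own statement) =====
-- stated objective: simpler
-- what changed: A builds the full list of colon-suffixes, then dedups it with a set and an accumulator list in a second pass before taking element 0; B is a single early-returning scan that returns the suffix of the first reason containing ':' and maintains no container.
import Mathlib
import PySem

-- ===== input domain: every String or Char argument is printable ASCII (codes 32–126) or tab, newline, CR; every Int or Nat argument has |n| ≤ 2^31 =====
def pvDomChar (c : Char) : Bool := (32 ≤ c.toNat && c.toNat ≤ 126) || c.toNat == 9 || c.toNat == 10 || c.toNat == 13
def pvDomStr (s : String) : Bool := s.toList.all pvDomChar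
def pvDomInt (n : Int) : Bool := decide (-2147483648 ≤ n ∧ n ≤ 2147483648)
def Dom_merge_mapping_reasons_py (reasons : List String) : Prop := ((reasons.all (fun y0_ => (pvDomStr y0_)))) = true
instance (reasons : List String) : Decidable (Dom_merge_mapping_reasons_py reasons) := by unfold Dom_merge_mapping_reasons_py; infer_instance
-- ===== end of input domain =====

-- B replaces A's build-then-dedup two-pass structure (colon-suffix list, seen set, unique
-- accumulator, take element 0) with a single early-returning scan; objective: simpler.

-- ===== PORT A =====
-- reason.split(":", 1)[1], guarded in A by ':' in reason (so the index is in range)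
def mmrSuffix (reason : String) : String :=
  ((PySem.Str.splitMax? reason ":" 1).getD []).getD 1 ""

-- the list comprehension: [reason.split(":", 1)[1] for reason in reasons if ":" in reason]
def mmrCleaned (reasons : List String) : List String :=
  reasons.foldr (fun reason acc =>
    if PySem.Str.isIn ":" reason then mmrSuffix reason :: acc else acc) []

-- the dedup loop over `cleaned` with `seen` set and `unique` accumulator
def mmrDedup (cleaned : List String) : List String × PySem.Set String :=
  cleaned.foldl (fun p reason =>
    if p.2.contains reason then p else (p.1 ++ [reason], p.2.add reason)) ([], PySem.Set.empty)

def merge_mapping_reasons_py (reasons : List String) : String :=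
  let cleaned := mmrCleaned reasons
  if cleaned = [] then "" else ((mmrDedup cleaned).1.headD "")

-- ===== PORT B =====
def merge_mapping_reasons_py_alt : List String → String
  | [] => ""
  | reason :: rest =>
    if PySem.Str.isIn ":" reason then
      ((PySem.Str.splitMax? reason ":" 1).getD []).getD 1 ""
    else merge_mapping_reasons_py_alt rest

-- ===== PRECONDITION & SPEC =====
def Spec_merge_mapping_reasons_py (reasons : List String) (out : String) : Prop := out = merge_mapping_reasons_py_alt reasons
instance (reasons : List String) (out : String) : Decidable (Spec_merge_mapping_reasons_py reasons out) := by unfold Spec_merge_mapping_reasons_py; infer_instance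

-- ===== CLAIM (what is proved, stated in full; the proofs are below) =====
def Claim_equal_merge_mapping_reasons_py : Prop := ∀ (reasons : List String), Dom_merge_mapping_reasons_py reasons → Spec_merge_mapping_reasons_py reasons (merge_mapping_reasons_py reasons)

-- ===== LEMMAS AND PROOFS =====

-- the dedup fold never changes the head of an already nonempty accumulator
theorem mmrDedup_head_inv (cs : List String) (p : List String × PySem.Set String)
    (h : p.1 ≠ []) :
    (cs.foldl (fun p reason =>
      if p.2.contains reason then p else (p.1 ++ [reason], p.2.add reason)) p).1.headD ""
      = p.1.headD "" := by
  induction cs generalizing p with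
  | nil => rfl
  | cons c cs ih =>
    simp only [List.foldl_cons]
    split
    · exact ih p h
    · rw [ih _ (by simp [h])]
      cases p1 : p.1 with
      | nil => exact absurd p1 h
      | cons a as => simp

-- the head of the dedup output is the head of its nonempty input
theorem mmrDedup_head (c : String) (cs : List String) :
    (mmrDedup (c :: cs)).1.headD "" = c := by
  unfold mmrDedup
  simp only [List.foldl_cons]
  rw [show ((([] : List String), PySem.Set.empty).2.contains c) = false from rfl]
  simp only [Bool.false_eq_true, if_false]
  rw [mmrDedup_head_inv cs _ (by simp)]
  rfl

theorem mmr_eq (reasons : List String) :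
    merge_mapping_reasons_py reasons = merge_mapping_reasons_py_alt reasons := by
  induction reasons with
  | nil => rfl
  | cons r rest ih =>
    unfold merge_mapping_reasons_py merge_mapping_reasons_py_alt
    simp only [mmrCleaned, List.foldr_cons]
    by_cases h : PySem.Str.isIn ":" r = true
    · simp only [h, if_true]
      rw [if_neg (by simp)]
      exact mmrDedup_head _ _
    · simp only [h]
      exact ih

-- ===== VERDICT (by name: the statement is the Claim_ definition above) =====
theorem merge_mapping_reasons_py_spec : Claim_equal_merge_mapping_reasons_py := by
  intro reasons _
  exact mmr_eq reasons
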